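-- pv_equiv track=rewrite | github.com/Gemdelle/BioScripts-python | ui/tkinter/JavaInterpreter.py | split_java_classes
-- ===== SOURCE A (Python) =====
-- def split_java_classes(java_code):
--     java_classes = []
--     current_class = ""
--
--     for line in java_code.splitlines():
--         if line.strip() == "//":  # Class limiter
--             if current_class.strip():
--                 java_classes.append(current_class.strip() + "\n")
--                 current_class = ""
--         else:
--             current_class += line + "\n"
--
--     if current_class.strip():
--         java_classes.append(current_class.strip() + "\n")
--
--     return java_classes
-- ===== SOURCE B (Python) =====
-- def split_java_classes(java_code):
--     # Partition the lines into groups separated by "//" delimiter lines,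
--     # then join/strip/filter each group in a second pass.
--     groups = [[]]
--     for line in java_code.splitlines():
--         if line.strip() == "//":
--             groups.append([])
--         else:
--             groups[-1].append(line)
--     result = []
--     for chunk in groups:
--         text = "\n".join(chunk).strip()
--         if text:
--             result.append(text + "\n")
--     return result
-- ===== Notes on version B (the rewrite author's own statement) =====
-- stated objective: alternative
-- what changed: Replaces A's single stateful accumulate-and-reset string loop with a two-pass partition-then-map: first split the lines into groups at '//' delimiter lines, then join/strip/filter each group.
import Mathlib
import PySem

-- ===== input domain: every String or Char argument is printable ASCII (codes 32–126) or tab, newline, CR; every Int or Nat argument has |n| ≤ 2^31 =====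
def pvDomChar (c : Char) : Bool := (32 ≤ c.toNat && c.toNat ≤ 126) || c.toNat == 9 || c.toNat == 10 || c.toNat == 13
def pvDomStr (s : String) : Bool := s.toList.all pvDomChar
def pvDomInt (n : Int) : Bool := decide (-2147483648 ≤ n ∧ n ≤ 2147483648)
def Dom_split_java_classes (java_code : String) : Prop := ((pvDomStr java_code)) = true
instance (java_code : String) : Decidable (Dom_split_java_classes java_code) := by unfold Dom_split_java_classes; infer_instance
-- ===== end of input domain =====

-- B replaces A's accumulate-and-reset loop by partition-into-groups then join/strip/filter (same cost, different decomposition).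
-- ===== PORT A =====
-- one loop step of A: delimiter line emits the stripped accumulator (if non-blank), other lines are appended
def pvStepA (st : List (List Char) × List Char) (line : List Char) : List (List Char) × List Char :=
  if PySem.Chars.strip line = ['/', '/'] then
    if PySem.Chars.strip st.2 ≠ [] then (st.1 ++ [PySem.Chars.strip st.2 ++ ['\n']], [])
    else st
  else (st.1, st.2 ++ line ++ ['\n'])

-- A's trailing 'if current_class.strip(): append'
def pvFinishA (st : List (List Char) × List Char) : List (List Char) :=
  if PySem.Chars.strip st.2 ≠ [] then st.1 ++ [PySem.Chars.strip st.2 ++ ['\n']] else st.1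

def split_java_classes (java_code : String) : List String :=
  (pvFinishA ((PySem.Chars.splitlines java_code.toList).foldl pvStepA ([], []))).map String.ofList

-- ===== PORT B =====
-- first pass: partition lines into groups at '//' delimiter lines
def pvGroupStep (gs : List (List (List Char))) (line : List Char) : List (List (List Char)) :=
  if PySem.Chars.strip line = ['/', '/'] then gs ++ [[]]
  else gs.dropLast ++ [gs.getLastD [] ++ [line]]

-- second pass: join each group, strip, keep the non-blank ones
def pvEmit (out : List (List Char)) (g : List (List Char)) : List (List Char) :=
  if PySem.Chars.strip (PySem.Chars.join ['\n'] g) ≠ [] then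
    out ++ [PySem.Chars.strip (PySem.Chars.join ['\n'] g) ++ ['\n']]
  else out

def split_java_classes_alt (java_code : String) : List String :=
  let groups := (PySem.Chars.splitlines java_code.toList).foldl pvGroupStep [[]]
  (groups.foldl pvEmit []).map String.ofList

-- ===== PRECONDITION & SPEC =====
def Spec_split_java_classes (java_code : String) (out : List String) : Prop := out = split_java_classes_alt java_code
instance (java_code : String) (out : List String) : Decidable (Spec_split_java_classes java_code out) := by unfold Spec_split_java_classes; infer_instance

-- ===== CLAIM (what is proved, stated in full; the proofs are below) =====
def Claim_equal_split_java_classes : Prop := ∀ (java_code : String), Dom_split_java_classes java_code → Spec_split_java_classes java_code (split_java_classes java_code)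

-- ===== LEMMAS AND PROOFS =====
-- cat g = what A's accumulator holds after the lines of group g: each line followed by '\n'
def pvCat (g : List (List Char)) : List Char := g.flatMap (fun l => l ++ ['\n'])

theorem pv_all_isspace_of_strip_nil {y : List Char}
    (h : PySem.Chars.strip y = []) : ∀ c ∈ y, PySem.Chars.isspace c = true := by
  intro c hc
  unfold PySem.Chars.strip PySem.Chars.rstrip PySem.Chars.lstrip at h
  have h2 : List.dropWhile PySem.Chars.isspace (List.dropWhile PySem.Chars.isspace y).reverse = [] := by
    simpa using congrArg List.reverse h
  have hall : ∀ x ∈ (List.dropWhile PySem.Chars.isspace y).reverse, PySem.Chars.isspace x = true :=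
    List.dropWhile_eq_nil_iff.mp h2
  have hy : y = List.takeWhile PySem.Chars.isspace y ++ List.dropWhile PySem.Chars.isspace y :=
    (List.takeWhile_append_dropWhile).symm
  rw [hy] at hc
  rcases List.mem_append.mp hc with h1 | h1
  · exact List.mem_takeWhile_imp h1
  · exact hall c (List.mem_reverse.mpr h1)


theorem pv_strip_append_left {ws x : List Char}
    (h : ∀ c ∈ ws, PySem.Chars.isspace c = true) :
    PySem.Chars.strip (ws ++ x) = PySem.Chars.strip x := by
  unfold PySem.Chars.strip PySem.Chars.lstrip
  rw [List.dropWhile_append, List.dropWhile_eq_nil_iff.mpr h]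
  simp


theorem pv_rstrip_append_ws {x ws : List Char}
    (h : ∀ c ∈ ws, PySem.Chars.isspace c = true) :
    PySem.Chars.rstrip (x ++ ws) = PySem.Chars.rstrip x := by
  unfold PySem.Chars.rstrip
  rw [List.reverse_append, List.dropWhile_append,
    List.dropWhile_eq_nil_iff.mpr (by intro a ha; exact h a (List.mem_reverse.mp ha))]
  simp

theorem pv_strip_append_right {x ws : List Char}
    (h : ∀ c ∈ ws, PySem.Chars.isspace c = true) :
    PySem.Chars.strip (x ++ ws) = PySem.Chars.strip x := by
  unfold PySem.Chars.strip PySem.Chars.lstrip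
  rw [List.dropWhile_append]
  by_cases hx : List.dropWhile PySem.Chars.isspace x = []
  · rw [hx, List.dropWhile_eq_nil_iff.mpr h]
    simp
  · rw [if_neg (by simpa using hx)]
    exact pv_rstrip_append_ws h

theorem pv_cat_cons (a : List Char) (rest : List (List Char)) :
    pvCat (a :: rest) = PySem.Chars.join ['\n'] (a :: rest) ++ ['\n'] := by
  induction rest generalizing a with
  | nil => simp [pvCat, PySem.Chars.join_singleton]
  | cons b rs ih =>
    rw [PySem.Chars.join_cons_cons]
    have hc : pvCat (a :: b :: rs) = (a ++ ['\n']) ++ pvCat (b :: rs) := by simp [pvCat]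
    rw [hc, ih b]
    simp

theorem pv_strip_cat_eq_join (g : List (List Char)) :
    PySem.Chars.strip (pvCat g) = PySem.Chars.strip (PySem.Chars.join ['\n'] g) := by
  cases g with
  | nil => rfl
  | cons a rest =>
    rw [pv_cat_cons]
    exact pv_strip_append_right (by intro c hc; simp at hc; subst hc; decide)

theorem pv_emit_acc (l : List (List (List Char))) (acc : List (List Char)) :
    l.foldl pvEmit acc = acc ++ l.foldl pvEmit [] := by
  induction l generalizing acc with
  | nil => simp
  | cons a l ih =>
    have he : ∀ acc2 : List (List Char), pvEmit acc2 a = acc2 ++ pvEmit [] a := by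
      intro acc2; unfold pvEmit; split_ifs <;> simp
    rw [List.foldl_cons, List.foldl_cons, ih (pvEmit acc a), ih (pvEmit [] a), he acc]
    simp

theorem pv_getLastD_append (xs ys : List (List (List Char))) (h : ys ≠ []) :
    (xs ++ ys).getLastD [] = ys.getLastD [] := by
  cases ys with
  | nil => exact absurd rfl h
  | cons y yt =>
    rw [List.getLastD_eq_getLast?, List.getLast?_append_of_ne_nil xs (by simp),
      ← List.getLastD_eq_getLast?]

theorem pv_group_split (lines : List (List Char)) (xs ys : List (List (List Char))) (h : ys ≠ []) :
    lines.foldl pvGroupStep (xs ++ ys) = xs ++ lines.foldl pvGroupStep ys := by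
  induction lines generalizing ys with
  | nil => simp
  | cons l ls ih =>
    rw [List.foldl_cons, List.foldl_cons]
    by_cases hd : PySem.Chars.strip l = ['/', '/']
    · rw [show pvGroupStep (xs ++ ys) l = xs ++ (ys ++ [[]]) from by
        simp [pvGroupStep, hd]]
      rw [show pvGroupStep ys l = ys ++ [[]] from by simp [pvGroupStep, hd]]
      exact ih (ys ++ [[]]) (by simp)
    · rw [show pvGroupStep (xs ++ ys) l = xs ++ (ys.dropLast ++ [ys.getLastD [] ++ [l]]) from by
        simp only [pvGroupStep, if_neg hd, List.dropLast_append_of_ne_nil h,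
          pv_getLastD_append xs ys h, List.append_assoc]]
      rw [show pvGroupStep ys l = ys.dropLast ++ [ys.getLastD [] ++ [l]] from by
        simp [pvGroupStep, hd]]
      exact ih (ys.dropLast ++ [ys.getLastD [] ++ [l]]) (by simp)

theorem pv_main (lines : List (List Char)) :
    ∀ (cls : List (List Char)) (ws : List Char) (g : List (List Char)),
      (∀ c ∈ ws, PySem.Chars.isspace c = true) →
      pvFinishA (lines.foldl pvStepA (cls, ws ++ pvCat g)) =
        cls ++ (lines.foldl pvGroupStep [g]).foldl pvEmit [] := by
  induction lines with
  | nil =>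
    intro cls ws g hws
    simp only [List.foldl_nil, List.foldl_cons]
    unfold pvFinishA pvEmit
    rw [pv_strip_append_left hws, pv_strip_cat_eq_join]
    split_ifs <;> simp
  | cons l ls ih =>
    intro cls ws g hws
    have hg : PySem.Chars.strip (ws ++ pvCat g) = PySem.Chars.strip (PySem.Chars.join ['\n'] g) := by
      rw [pv_strip_append_left hws, pv_strip_cat_eq_join]
    rw [List.foldl_cons, List.foldl_cons]
    by_cases hd : PySem.Chars.strip l = ['/', '/']
    · by_cases hne : PySem.Chars.strip (ws ++ pvCat g) = []
      · -- delimiter line, accumulator blank: A keeps the whitespace, B starts a fresh group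
        rw [show pvStepA (cls, ws ++ pvCat g) l = (cls, ws ++ pvCat g) from by
          simp [pvStepA, hd, hne]]
        have hws' := pv_all_isspace_of_strip_nil hne
        have hmain := ih cls (ws ++ pvCat g) [] hws'
        rw [show (ws ++ pvCat g) ++ pvCat [] = ws ++ pvCat g from by simp [pvCat]] at hmain
        rw [hmain, show pvGroupStep [g] l = [g] ++ [[]] from by simp [pvGroupStep, hd],
          pv_group_split ls [g] [[]] (by simp), List.foldl_append, List.foldl_cons, List.foldl_nil]
        have hemit : pvEmit [] g = [] := by
          unfold pvEmit
          rw [if_neg]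
          rw [not_not, ← hg]
          exact hne
        rw [hemit]
      · -- delimiter line, accumulator non-blank: A emits, B closes the group
        rw [show pvStepA (cls, ws ++ pvCat g) l
            = (cls ++ [PySem.Chars.strip (ws ++ pvCat g) ++ ['\n']], ([] : List Char)) from by
          simp [pvStepA, hd, hne]]
        have hemit : pvEmit [] g = [PySem.Chars.strip (PySem.Chars.join ['\n'] g) ++ ['\n']] := by
          unfold pvEmit
          rw [if_pos (by rw [← hg]; exact hne)]
          simp
        have hmain : pvFinishA (List.foldl pvStepA
              (cls ++ [PySem.Chars.strip (ws ++ pvCat g) ++ ['\n']], ([] : List Char)) ls)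
            = (cls ++ [PySem.Chars.strip (ws ++ pvCat g) ++ ['\n']]) ++
              List.foldl pvEmit [] (List.foldl pvGroupStep [[]] ls) :=
          ih (cls ++ [PySem.Chars.strip (ws ++ pvCat g) ++ ['\n']]) [] []
            (by intro c hc; cases hc)
        rw [hmain, show pvGroupStep [g] l = [g] ++ [[]] from by simp [pvGroupStep, hd],
          pv_group_split ls [g] [[]] (by simp), List.foldl_append, List.foldl_cons,
          List.foldl_nil, hemit,
          pv_emit_acc _ [PySem.Chars.strip (PySem.Chars.join ['\n'] g) ++ ['\n']]]
        simp [hg]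
    · -- ordinary line: appended to the accumulator / to the last group
      rw [show pvStepA (cls, ws ++ pvCat g) l = (cls, ws ++ pvCat (g ++ [l])) from by
        simp [pvStepA, hd, pvCat]]
      rw [show pvGroupStep [g] l = [g ++ [l]] from by simp [pvGroupStep, hd]]
      exact ih cls ws (g ++ [l]) hws

-- ===== VERDICT (by name: the statement is the Claim_ definition above) =====
theorem split_java_classes_spec : Claim_equal_split_java_classes := by
  intro java_code _
  unfold Spec_split_java_classes split_java_classes split_java_classes_alt
  have := pv_main (PySem.Chars.splitlines java_code.toList) [] [] []
    (by intro c hc; cases hc)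
  simp [pvCat] at this
  simp [this]
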